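-- pv_equiv track=rewrite | github.com/bmalbusca/slack-tui | processors/autocomplete.py | fuzzy_match_channels
-- ===== SOURCE A (Python) =====
-- from typing import List, Tuple
--
-- def fuzzy_match_channels(query: str, channels: List[dict]) -> List[Tuple[dict, int]]:
--     """Fuzzy match channels by name."""
--     query = query.lower().strip('#')
--     matches = []
--
--     for channel in channels:
--         name = channel['name'].lower()
--
--         if name == query:
--             matches.append((channel, 100))
--         elif name.startswith(query):
--             matches.append((channel, 90))
--         elif query in name:
--             matches.append((channel, 70))
--         elif all(c in name for c in query):
--             matches.append((channel, 50))
--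
--     matches.sort(key=lambda x: x[1], reverse=True)
--     return matches
-- ===== SOURCE B (Python) =====
-- def _score(name, query):
--     """Match quality of one lowercased channel name against the query, 0 = no match."""
--     if name == query:
--         return 100
--     if name.startswith(query):
--         return 90
--     if query in name:
--         return 70
--     if all(c in name for c in query):
--         return 50
--     return 0
--
-- def fuzzy_match_channels(query, channels):
--     """Fuzzy match channels by name: score once, then select by descending level."""
--     q = query.lower().strip('#')
--     scored = [(ch, _score(ch['name'].lower(), q)) for ch in channels]
--     return [p for level in (100, 90, 70, 50) for p in scored if p[1] == level]
-- ===== Notes on version B (the rewrite author's own statement) =====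
-- stated objective: alternative
-- what changed: Replaces A's accumulate-then-stable-sort with two staged passes: a total scoring function maps every channel to its level once, then the output is selected by iterating the four levels 100/90/70/50 in order and filtering the scored list, so no sort is performed and non-matches are dropped by the level filter instead of by branch structure.
import Mathlib
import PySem

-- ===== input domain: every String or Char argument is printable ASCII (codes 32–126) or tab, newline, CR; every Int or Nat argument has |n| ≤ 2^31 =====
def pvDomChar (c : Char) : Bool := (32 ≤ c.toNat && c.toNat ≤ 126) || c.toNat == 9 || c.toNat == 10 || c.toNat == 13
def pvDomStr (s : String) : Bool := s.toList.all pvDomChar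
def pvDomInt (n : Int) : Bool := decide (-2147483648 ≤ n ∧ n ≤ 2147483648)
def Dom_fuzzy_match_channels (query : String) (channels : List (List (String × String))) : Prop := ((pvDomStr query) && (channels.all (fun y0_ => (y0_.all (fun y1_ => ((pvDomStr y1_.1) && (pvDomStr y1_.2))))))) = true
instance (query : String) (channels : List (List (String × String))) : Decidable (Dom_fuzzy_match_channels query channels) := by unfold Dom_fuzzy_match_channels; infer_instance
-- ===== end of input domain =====

-- B replaces A's accumulate-then-stable-sort with a scoring pass followed by four level filters, concatenated in descending score order (no sort).

-- ===== PORT A =====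
def fuzzy_match_channels (query : String) (channels : List (List (String × String))) : List ((List (String × String)) × Int) :=
  let q := PySem.Str.stripChars (PySem.Str.lower query) "#"
  let ms := channels.foldl (fun acc channel =>
    match PySem.Dict.get? (PySem.Dict.mk channel) "name" with
    | none => acc   -- Python raises KeyError here; excluded by Pre_
    | some nm =>
      let name := PySem.Str.lower nm
      if name = q then acc ++ [(channel, (100 : Int))]
      else if PySem.Str.startswith name q then acc ++ [(channel, (90 : Int))]
      else if PySem.Str.isIn q name then acc ++ [(channel, (70 : Int))]
      else if q.toList.all (fun c => PySem.Chars.isIn [c] name.toList) then acc ++ [(channel, (50 : Int))]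
      else acc) []
  PySem.List.sorted ms (fun x => x.2) true

-- ===== PORT B =====
-- Source B's _score: total match-quality function, 0 meaning no match
def pvScore (name : String) (query : String) : Int :=
  if name = query then 100
  else if PySem.Str.startswith name query then 90
  else if PySem.Str.isIn query name then 70
  else if query.toList.all (fun c => PySem.Chars.isIn [c] name.toList) then 50
  else 0

def fuzzy_match_channels_alt (query : String) (channels : List (List (String × String))) : List ((List (String × String)) × Int) :=
  let q := PySem.Str.stripChars (PySem.Str.lower query) "#"
  let scored := channels.map (fun ch =>
    match PySem.Dict.get? (PySem.Dict.mk ch) "name" with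
    | none => (ch, (0 : Int))   -- Python raises KeyError here; excluded by Pre_
    | some nm => (ch, pvScore (PySem.Str.lower nm) q))
  ([100, 90, 70, 50] : List Int).flatMap (fun level => scored.filter (fun p => p.2 == level))

-- ===== PRECONDITION & SPEC =====
-- Pre_ excludes exactly the channels lists with a dict lacking a 'name' key, where Python A raises KeyError.
def Pre_fuzzy_match_channels (_query : String) (channels : List (List (String × String))) : Prop :=
  channels.all (fun ch => (PySem.Dict.get? (PySem.Dict.mk ch) "name").isSome) = true
instance (query : String) (channels : List (List (String × String))) : Decidable (Pre_fuzzy_match_channels query channels) := by unfold Pre_fuzzy_match_channels; infer_instance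

def pvWitness_fuzzy_match_channels : String × (List (List (String × String))) :=
  ("#Gen", [[("name", "general")], [("name", "random")], [("name", "genchat")]])

def Spec_fuzzy_match_channels (query : String) (channels : List (List (String × String))) (out : List ((List (String × String)) × Int)) : Prop := out = fuzzy_match_channels_alt query channels
instance (query : String) (channels : List (List (String × String))) (out : List ((List (String × String)) × Int)) : Decidable (Spec_fuzzy_match_channels query channels out) := by unfold Spec_fuzzy_match_channels; infer_instance

-- ===== CLAIM (what is proved, stated in full; the proofs are below) =====
def Claim_equal_fuzzy_match_channels : Prop := ∀ (query : String) (channels : List (List (String × String))), Dom_fuzzy_match_channels query channels → Pre_fuzzy_match_channels query channels → Spec_fuzzy_match_channels query channels (fuzzy_match_channels query channels)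

-- ===== LEMMAS AND PROOFS =====

-- the single (channel, score) item a channel contributes in A, or []
def pvEmit (q : String) (channel : List (String × String)) : List ((List (String × String)) × Int) :=
  match PySem.Dict.get? (PySem.Dict.mk channel) "name" with
  | none => []
  | some nm =>
    if PySem.Str.lower nm = q then [(channel, (100 : Int))]
    else if PySem.Str.startswith (PySem.Str.lower nm) q then [(channel, (90 : Int))]
    else if PySem.Str.isIn q (PySem.Str.lower nm) then [(channel, (70 : Int))]
    else if q.toList.all (fun c => PySem.Chars.isIn [c] (PySem.Str.lower nm).toList) then [(channel, (50 : Int))]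
    else []

def pvFilt (s : Int) (ms : List ((List (String × String)) × Int)) : List ((List (String × String)) × Int) :=
  ms.filter (fun p => p.2 == s)

lemma pvEmit_score (q : String) (ch : List (String × String)) :
    ∀ p ∈ pvEmit q ch, p.2 = 100 ∨ p.2 = 90 ∨ p.2 = 70 ∨ p.2 = 50 := by
  intro p hp
  unfold pvEmit at hp
  rcases h : PySem.Dict.get? (PySem.Dict.mk ch) "name" with _ | nm <;> rw [h] at hp
  · simp at hp
  · simp only at hp
    split_ifs at hp <;> simp_all

-- A's scan is the flatMap of pvEmit
lemma pvA_fold (q : String) (channels : List (List (String × String))) (init : List ((List (String × String)) × Int)) :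
    channels.foldl (fun acc channel =>
      match PySem.Dict.get? (PySem.Dict.mk channel) "name" with
      | none => acc
      | some nm =>
        let name := PySem.Str.lower nm
        if name = q then acc ++ [(channel, (100 : Int))]
        else if PySem.Str.startswith name q then acc ++ [(channel, (90 : Int))]
        else if PySem.Str.isIn q name then acc ++ [(channel, (70 : Int))]
        else if q.toList.all (fun c => PySem.Chars.isIn [c] name.toList) then acc ++ [(channel, (50 : Int))]
        else acc) init
    = init ++ channels.flatMap (pvEmit q) := by
  induction channels generalizing init with
  | nil => simp
  | cons ch chs ih =>
    rcases h : PySem.Dict.get? (PySem.Dict.mk ch) "name" with _ | nm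
    · simp only [List.foldl_cons, List.flatMap_cons, h]
      rw [ih]
      simp [pvEmit, h]
    · simp only [List.foldl_cons, List.flatMap_cons, h]
      split_ifs with h1 h2 h3 h4 <;> rw [ih] <;> clear ih <;>
        simp_all [pvEmit, List.append_assoc]

-- for a nonzero level, filtering B's scored list equals filtering A's emitted list
lemma pvB_filter (q : String) (channels : List (List (String × String))) (lvl : Int) (hl : lvl ≠ 0) :
    (channels.map (fun ch =>
      match PySem.Dict.get? (PySem.Dict.mk ch) "name" with
      | none => (ch, (0 : Int))
      | some nm => (ch, pvScore (PySem.Str.lower nm) q))).filter (fun p => p.2 == lvl)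
    = pvFilt lvl (channels.flatMap (pvEmit q)) := by
  induction channels with
  | nil => simp [pvFilt]
  | cons ch chs ih =>
    simp only [List.map_cons, List.flatMap_cons, List.filter_cons, List.filter_append, pvFilt] at ih ⊢
    rw [ih]
    rcases h : PySem.Dict.get? (PySem.Dict.mk ch) "name" with _ | nm
    · rw [show ((ch, (0 : Int)).2 == lvl) = false by simpa using fun he => hl he.symm]
      simp [pvEmit, h]
    · simp only [h]
      unfold pvScore pvEmit
      rw [h]
      split_ifs <;> simp_all

lemma pvInsertBy_front {α : Type} (before : α → α → Bool) (x : α) (R : List α)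
    (h : ∀ y ∈ R, before x y = true) :
    PySem.List.insertBy before x R = x :: R := by
  cases R with
  | nil => rfl
  | cons y ys => simp [PySem.List.insertBy, h y (by simp)]

lemma pvInsertBy_append_left {α : Type} (before : α → α → Bool) (x : α) (A R : List α)
    (h : ∀ y ∈ A, before x y = false) :
    PySem.List.insertBy before x (A ++ R) = A ++ PySem.List.insertBy before x R := by
  induction A with
  | nil => rfl
  | cons a as ih =>
    simp only [List.cons_append, PySem.List.insertBy, h a (by simp)]
    rw [ih (fun y hy => h y (by simp [hy]))]
    simp

-- stable reverse-sort of a {100,90,70,50}-scored list is the concatenation of its score blocks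
lemma pvSortInv (ms A B C D : List ((List (String × String)) × Int))
    (hA : ∀ p ∈ A, p.2 = 100) (hB : ∀ p ∈ B, p.2 = 90)
    (hC : ∀ p ∈ C, p.2 = 70) (hD : ∀ p ∈ D, p.2 = 50)
    (hm : ∀ p ∈ ms, p.2 = 100 ∨ p.2 = 90 ∨ p.2 = 70 ∨ p.2 = 50) :
    ms.foldl (fun acc x => PySem.List.insertBy (fun a b => decide (b.2 < a.2)) x acc) (A ++ B ++ C ++ D)
    = (A ++ pvFilt 100 ms) ++ (B ++ pvFilt 90 ms) ++ (C ++ pvFilt 70 ms) ++ (D ++ pvFilt 50 ms) := by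
  induction ms generalizing A B C D with
  | nil => simp [pvFilt]
  | cons x xs ih =>
    have hx := hm x (by simp)
    have hxs : ∀ p ∈ xs, p.2 = 100 ∨ p.2 = 90 ∨ p.2 = 70 ∨ p.2 = 50 :=
      fun p hp => hm p (by simp [hp])
    simp only [List.foldl_cons]
    rcases hx with h | h | h | h
    · -- score 100: goes to the end of block A
      rw [show A ++ B ++ C ++ D = A ++ (B ++ C ++ D) by simp [List.append_assoc],
        pvInsertBy_append_left _ x _ _ (by intro y hy; simp [hA y hy, h]),
        pvInsertBy_front _ x _ (by
          intro y hy
          simp only [List.mem_append] at hy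
          rcases hy with (hy | hy) | hy
          · simp [hB y hy, h]
          · simp [hC y hy, h]
          · simp [hD y hy, h])]
      have := ih (A ++ [x]) B C D
        (by intro p hp; rcases List.mem_append.1 hp with hp | hp
            · exact hA p hp
            · simp at hp; simp [hp, h]) hB hC hD hxs
      rw [show A ++ (x :: (B ++ C ++ D)) = (A ++ [x]) ++ B ++ C ++ D by simp [List.append_assoc]]
      rw [this]
      simp [pvFilt, h, List.append_assoc]
    · -- score 90: end of block B
      rw [show A ++ B ++ C ++ D = (A ++ B) ++ (C ++ D) by simp [List.append_assoc],
        pvInsertBy_append_left _ x _ _ (by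
          intro y hy
          rcases List.mem_append.1 hy with hy | hy
          · simp [hA y hy, h]
          · simp [hB y hy, h]),
        pvInsertBy_front _ x _ (by
          intro y hy
          rcases List.mem_append.1 hy with hy | hy
          · simp [hC y hy, h]
          · simp [hD y hy, h])]
      have := ih A (B ++ [x]) C D hA
        (by intro p hp; rcases List.mem_append.1 hp with hp | hp
            · exact hB p hp
            · simp at hp; simp [hp, h]) hC hD hxs
      rw [show (A ++ B) ++ (x :: (C ++ D)) = A ++ (B ++ [x]) ++ C ++ D by simp [List.append_assoc]]
      rw [this]
      simp [pvFilt, h, List.append_assoc]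
    · -- score 70: end of block C
      rw [show A ++ B ++ C ++ D = (A ++ B ++ C) ++ D by simp [List.append_assoc],
        pvInsertBy_append_left _ x _ _ (by
          intro y hy
          simp only [List.mem_append] at hy
          rcases hy with (hy | hy) | hy
          · simp [hA y hy, h]
          · simp [hB y hy, h]
          · simp [hC y hy, h]),
        pvInsertBy_front _ x _ (by intro y hy; simp [hD y hy, h])]
      have := ih A B (C ++ [x]) D hA hB
        (by intro p hp; rcases List.mem_append.1 hp with hp | hp
            · exact hC p hp
            · simp at hp; simp [hp, h]) hD hxs
      rw [show (A ++ B ++ C) ++ (x :: D) = A ++ B ++ (C ++ [x]) ++ D by simp [List.append_assoc]]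
      rw [this]
      simp [pvFilt, h, List.append_assoc]
    · -- score 50: very end
      rw [PySem.List.insertBy_of_forall_not_before _ x _ (by
          intro y hy
          simp only [List.mem_append] at hy
          rcases hy with ((hy | hy) | hy) | hy
          · simp [hA y hy, h]
          · simp [hB y hy, h]
          · simp [hC y hy, h]
          · simp [hD y hy, h])]
      have := ih A B C (D ++ [x]) hA hB hC
        (by intro p hp; rcases List.mem_append.1 hp with hp | hp
            · exact hD p hp
            · simp at hp; simp [hp, h]) hxs
      rw [show (A ++ B ++ C ++ D) ++ [x] = A ++ B ++ C ++ (D ++ [x]) by simp [List.append_assoc]]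
      rw [this]
      simp [pvFilt, h, List.append_assoc]

-- ===== VERDICT (by name: the statement is the Claim_ definition above) =====
theorem fuzzy_match_channels_spec : Claim_equal_fuzzy_match_channels := by
  intro query channels _ _
  unfold Spec_fuzzy_match_channels fuzzy_match_channels fuzzy_match_channels_alt
  simp only [pvA_fold, List.nil_append, List.flatMap_cons, List.flatMap_nil, List.append_nil]
  rw [PySem.List.sorted_rev_eq_foldl_insertBy]
  rw [pvB_filter _ _ 100 (by norm_num), pvB_filter _ _ 90 (by norm_num),
      pvB_filter _ _ 70 (by norm_num), pvB_filter _ _ 50 (by norm_num)]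
  have := pvSortInv (channels.flatMap (pvEmit (PySem.Str.stripChars (PySem.Str.lower query) "#"))) [] [] [] []
    (by simp) (by simp) (by simp) (by simp)
    (by intro p hp; rcases List.mem_flatMap.1 hp with ⟨ch, _, hp⟩; exact pvEmit_score _ ch p hp)
  simpa using this
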